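-- pv_equiv track=rewrite | github.com/kmwasiluk/Turnpike | Turnpike/python/turnpike_newton.py | mult_magma
-- ===== SOURCE A (Python) =====
-- def mult_magma(v1,v2):
--     interm = []
--     ret = []
--     for e1 in v1:
--         for e2 in v2:
--             interm.append((e1[0]*e2[0], abs(e1[1] - e2[1])))
--     interm = sorted(interm,key=lambda x: x[1])
--     #Gather like terms...
--     curr = -1
--     for i in range(0,len(interm)):
--         if(curr > i):
--             continue
--         j = i
--         z = 0
--         while(j < len(interm) and interm[i][1] == interm[j][1]):
--             z += interm[j][0]
--             j+=1
--         ret.append((z,interm[i][1]))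
--         curr = j
--     return ret
-- ===== SOURCE B (Python) =====
-- def mult_magma(v1, v2):
--     acc = {}
--     for a, x in v1:
--         for b, y in v2:
--             k = abs(x - y)
--             acc[k] = acc.get(k, 0) + a * b
--     return [(acc[k], k) for k in sorted(acc)]
-- ===== Notes on version B (the rewrite author's own statement) =====
-- stated objective: faster
-- what changed: Replaces materialising all n*m pair terms, sorting them, and a two-index gather loop by a single pass that accumulates sums in a dict keyed by the absolute difference, then sorts only the distinct keys.
import Mathlib
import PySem

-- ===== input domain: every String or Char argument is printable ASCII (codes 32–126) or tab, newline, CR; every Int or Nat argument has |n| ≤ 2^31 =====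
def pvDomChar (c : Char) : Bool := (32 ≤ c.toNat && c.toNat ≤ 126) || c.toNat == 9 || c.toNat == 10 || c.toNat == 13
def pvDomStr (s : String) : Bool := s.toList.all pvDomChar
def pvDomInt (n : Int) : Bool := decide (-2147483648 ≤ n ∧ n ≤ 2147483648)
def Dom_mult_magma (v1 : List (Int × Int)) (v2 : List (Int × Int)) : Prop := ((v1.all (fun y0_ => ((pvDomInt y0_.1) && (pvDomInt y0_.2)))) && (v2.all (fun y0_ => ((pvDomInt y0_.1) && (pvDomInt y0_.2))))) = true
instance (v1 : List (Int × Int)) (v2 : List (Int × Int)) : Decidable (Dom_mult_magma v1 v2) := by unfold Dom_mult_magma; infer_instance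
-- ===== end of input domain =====

set_option maxRecDepth 8192


-- B replaces A's materialise-all-terms + sort-all-terms + gather pass by one accumulation
-- pass into a dict keyed by the absolute difference, sorting only the distinct keys.

-- ===== PORT A =====
-- while(j < len(interm) and interm[i][1] == interm[j][1]): z += interm[j][0]; j += 1
-- (called with k = interm[i][1]; returns the final (z, j))
def pvWhileSum (interm : List (Int × Int)) (k : Int) (j : Nat) (z : Int) : Int × Nat :=
  if h : j < interm.length then
    if interm[j].2 = k then pvWhileSum interm k (j + 1) (z + interm[j].1)
    else (z, j)
  else (z, j)
termination_by interm.length - j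

-- one iteration of A's "for i in range(0, len(interm))" gather loop; state = (curr, ret)
def pvGatherStep (interm : List (Int × Int)) (st : Int × List (Int × Int)) (i : Nat) :
    Int × List (Int × Int) :=
  if st.1 > (i : Int) then st
  else
    let k := (interm.getD i (0, 0)).2
    let zj := pvWhileSum interm k i 0
    ((zj.2 : Int), st.2 ++ [(zj.1, k)])

def mult_magma (v1 : List (Int × Int)) (v2 : List (Int × Int)) : List (Int × Int) :=
  let interm :=
    v1.foldl (fun acc e1 =>
      v2.foldl (fun acc e2 => acc ++ [(e1.1 * e2.1, |e1.2 - e2.2|)]) acc) []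
  let interm := PySem.List.sorted interm (fun x => x.2) false
  ((List.range interm.length).foldl (pvGatherStep interm) (-1, [])).2

-- ===== PORT B =====
def mult_magma_alt (v1 : List (Int × Int)) (v2 : List (Int × Int)) : List (Int × Int) :=
  let acc :=
    v1.foldl (fun d e1 =>
      v2.foldl (fun d e2 => d.modify |e1.2 - e2.2| 0 (· + e1.1 * e2.1)) d) PySem.Dict.empty
  (PySem.List.sorted acc.keys (fun k => k) false).map (fun k => (acc.getD k 0, k))

-- ===== PRECONDITION & SPEC =====
def Spec_mult_magma (v1 : List (Int × Int)) (v2 : List (Int × Int)) (out : List (Int × Int)) : Prop := out = mult_magma_alt v1 v2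
instance (v1 : List (Int × Int)) (v2 : List (Int × Int)) (out : List (Int × Int)) : Decidable (Spec_mult_magma v1 v2 out) := by unfold Spec_mult_magma; infer_instance

-- ===== CLAIM (what is proved, stated in full; the proofs are below) =====
def Claim_equal_mult_magma : Prop := ∀ (v1 : List (Int × Int)) (v2 : List (Int × Int)), Dom_mult_magma v1 v2 → Spec_mult_magma v1 v2 (mult_magma v1 v2)

-- ===== LEMMAS AND PROOFS =====

-- the list of (product, |difference|) terms both programs iterate over
def pvPairs (v1 v2 : List (Int × Int)) : List (Int × Int) :=
  v1.flatMap (fun e1 => v2.map (fun e2 => (e1.1 * e2.1, |e1.2 - e2.2|)))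

-- sum of the products carrying key k
def pvS (k : Int) (l : List (Int × Int)) : Int :=
  ((l.filter (fun p => p.2 == k)).map (·.1)).sum

-- grouped view of a term list: distinct keys in first-occurrence order, each with its sum
def pvGroups (l : List (Int × Int)) : List (Int × Int) :=
  (PySem.Set.ofList (l.map (·.2))).map (fun k => (pvS k l, k))

lemma pv_nested_foldl {σ : Type} (v1 v2 : List (Int × Int))
    (f : (Int × Int) → (Int × Int) → (Int × Int)) (g : σ → (Int × Int) → σ) (d0 : σ) :
    v1.foldl (fun d e1 => v2.foldl (fun d e2 => g d (f e1 e2)) d) d0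
      = (v1.flatMap (fun e1 => v2.map (f e1))).foldl g d0 := by
  induction v1 generalizing d0 with
  | nil => rfl
  | cons e1 t ih => simp [List.foldl_append, List.foldl_map, ih]

lemma pv_foldl_append_singleton (l : List (Int × Int)) (a0 : List (Int × Int)) :
    l.foldl (fun a x => a ++ [x]) a0 = a0 ++ l := by
  induction l generalizing a0 with
  | nil => simp
  | cons x t ih => simp [ih]

lemma pv_getD_fold (l : List (Int × Int)) (d : PySem.Dict Int Int) (k : Int) :
    (l.foldl (fun d p => d.modify p.2 0 (· + p.1)) d).getD k 0 = d.getD k 0 + pvS k l := by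
  induction l generalizing d with
  | nil => simp [pvS]
  | cons p t ih =>
    simp only [List.foldl_cons, ih, PySem.Dict.getD_modify, pvS, List.filter_cons]
    by_cases h : p.2 = k <;> simp [h] <;> omega

lemma pv_whileSum_spec (s : List (Int × Int)) (k : Int) :
    ∀ N j z, s.length - j ≤ N →
      pvWhileSum s k j z
        = (z + (((s.drop j).takeWhile (fun p => p.2 == k)).map (·.1)).sum,
           j + ((s.drop j).takeWhile (fun p => p.2 == k)).length) := by
  intro N
  induction N with
  | zero =>
    intro j z hN
    have hj : s.length ≤ j := by omega
    rw [pvWhileSum]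
    simp [Nat.not_lt.mpr hj, List.drop_eq_nil_of_le hj]
  | succ N ih =>
    intro j z hN
    rw [pvWhileSum]
    by_cases hj : j < s.length
    · have hdrop : s.drop j = s[j] :: s.drop (j + 1) := List.drop_eq_getElem_cons hj
      by_cases hk : s[j].2 = k
      · rw [dif_pos hj, if_pos hk, ih (j + 1) (z + s[j].1) (by omega), hdrop,
           List.takeWhile_cons]
        simp only [hk, BEq.rfl, if_true, List.map_cons, List.sum_cons, List.length_cons]
        rw [Prod.mk.injEq]
        exact ⟨by ring, by omega⟩
      · rw [dif_pos hj, if_neg hk, hdrop, List.takeWhile_cons]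
        have : (s[j].2 == k) = false := by simpa using hk
        simp [this]
    · rw [dif_neg hj]
      simp [List.drop_eq_nil_of_le (by omega : s.length ≤ j)]

-- an all-equal key list collapses to the singleton set [k]
lemma pv_add_all_eq (k : Int) : ∀ m : List Int, (∀ a ∈ m, a = k) →
    m.foldl PySem.Set.add [k] = [k] := by
  intro m
  induction m with
  | nil => intro _; rfl
  | cons a t ih =>
    intro h
    have ha : a = k := h a (by simp)
    have : PySem.Set.add [k] a = [k] := by
      simp [PySem.Set.add, PySem.Set.contains, ha]
    rw [List.foldl_cons, this]
    exact ih (fun b hb => h b (by simp [hb]))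

lemma pv_foldl_add_cons (k : Int) : ∀ (m s : List Int), k ∉ m →
    m.foldl PySem.Set.add (k :: s) = k :: m.foldl PySem.Set.add s := by
  intro m
  induction m with
  | nil => intro s _; rfl
  | cons a t ih =>
    intro s hk
    have hak : a ≠ k := fun h => hk (by simp [h])
    have : PySem.Set.add (k :: s) a = k :: PySem.Set.add s a := by
      simp [PySem.Set.add, PySem.Set.contains, hak]
      by_cases h : a ∈ s <;> simp [h]
    rw [List.foldl_cons, this, List.foldl_cons]
    exact ih _ (fun h => hk (by simp [h]))

-- one whole group peels off the front of a key-sorted term list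
lemma pv_groups_cons (l : List (Int × Int)) (hl : l.Pairwise (fun a b => a.2 ≤ b.2))
    (x : Int × Int) (xs : List (Int × Int)) (hc : l = x :: xs) :
    pvGroups l
      = (((l.takeWhile (fun p => p.2 == x.2)).map (·.1)).sum, x.2)
        :: pvGroups (l.dropWhile (fun p => p.2 == x.2)) := by
  set pred : Int × Int → Bool := fun p => p.2 == x.2 with hpred
  set t := l.takeWhile pred with htdef
  set u := l.dropWhile pred with hudef
  have htu : t ++ u = l := List.takeWhile_append_dropWhile
  have ht_all : ∀ p ∈ t, p.2 = x.2 := by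
    intro p hp
    have := List.mem_takeWhile_imp hp
    simpa [hpred] using this
  have hxt : x ∈ t := by
    have : pred x = true := by simp [hpred]
    rw [htdef, hc, List.takeWhile_cons, this]
    simp
  have hu_gt : ∀ p ∈ u, x.2 < p.2 := by
    rw [← htu] at hl
    rw [List.pairwise_append] at hl
    obtain ⟨-, hu_pw, hcross⟩ := hl
    cases hcases : u with
    | nil => intro p hp; simp at hp
    | cons y u' =>
      have hune : u ≠ [] := by rw [hcases]; simp
      have hhead : pred (u.head hune) = false := List.head_dropWhile_not pred hune
      have hyhead : u.head hune = y := by simp [hcases]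
      rw [hyhead] at hhead
      have hy_ne : y.2 ≠ x.2 := by simpa [hpred] using hhead
      have hy_ge : x.2 ≤ y.2 := hcross x hxt y (by rw [hcases]; simp)
      have hy_gt : x.2 < y.2 := lt_of_le_of_ne hy_ge (Ne.symm hy_ne)
      rw [hcases] at hu_pw
      rw [List.pairwise_cons] at hu_pw
      intro p hp
      rcases List.mem_cons.mp hp with h | h
      · rw [h]; exact hy_gt
      · have : y.2 ≤ p.2 := hu_pw.1 p h
        omega
  have hk_not_u : x.2 ∉ u.map (·.2) := by
    intro h
    obtain ⟨p, hp, hpk⟩ := List.mem_map.mp h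
    have := hu_gt p hp
    omega
  -- the distinct keys of l are x.2 followed by the distinct keys of u
  have hset : PySem.Set.ofList (l.map (·.2)) = x.2 :: PySem.Set.ofList (u.map (·.2)) := by
    rw [← htu, List.map_append, PySem.Set.ofList_eq_foldl, List.foldl_append]
    have ht_keys : (t.map (·.2)).foldl PySem.Set.add [] = [x.2] := by
      obtain ⟨t', ht'⟩ : ∃ t', t = x :: t' := by
        rw [htdef, hc, List.takeWhile_cons] at *
        have : pred x = true := by simp [hpred]
        rw [this] at htdef ⊢
        exact ⟨_, rfl⟩
      rw [ht', List.map_cons, List.foldl_cons]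
      have h0 : PySem.Set.add [] x.2 = [x.2] := rfl
      rw [h0]
      exact pv_add_all_eq x.2 _ (by
        intro a ha
        obtain ⟨p, hp, hpa⟩ := List.mem_map.mp ha
        rw [← hpa]
        exact ht_all p (by simp [ht', hp]))
    rw [ht_keys, pv_foldl_add_cons x.2 _ _ hk_not_u, ← PySem.Set.ofList_eq_foldl]
  -- sums: the head key's whole group is in t; t contributes nothing to other keys
  have hS_head : pvS x.2 l = (t.map (·.1)).sum := by
    rw [← htu, pvS, List.filter_append]
    have h1 : t.filter pred = t := List.filter_eq_self.mpr (fun p hp => by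
      simp [hpred, ht_all p hp])
    have h2 : u.filter pred = [] := List.filter_eq_nil_iff.mpr (fun p hp => by
      have := hu_gt p hp
      simp [hpred]
      omega)
    rw [hpred] at h1 h2
    rw [h1, h2, List.append_nil]
  have hS_rest : ∀ k ∈ PySem.Set.ofList (u.map (·.2)), pvS k l = pvS k u := by
    intro k hk
    have hk' : x.2 < k := by
      obtain ⟨p, hp, hpk⟩ := List.mem_map.mp ((PySem.Set.mem_ofList _ _).mp hk)
      rw [← hpk]; exact hu_gt p hp
    rw [← htu, pvS, List.filter_append]
    have h1 : t.filter (fun p => p.2 == k) = [] := List.filter_eq_nil_iff.mpr (fun p hp => by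
      have := ht_all p hp
      simp
      omega)
    rw [h1, List.nil_append]
    rfl
  rw [pvGroups, hset, List.map_cons, hS_head]
  congr 1
  rw [pvGroups]
  exact List.map_congr_left (fun k hk => by rw [hS_rest k hk])

lemma pv_skip_fold (s : List (Int × Int)) :
    ∀ (b a : Nat) (c : Int) (r : List (Int × Int)), ((a : Int) + (b : Int) ≤ c) →
      (List.range' a b 1).foldl (pvGatherStep s) (c, r) = (c, r) := by
  intro b
  induction b with
  | zero => intro a c r _; rfl
  | succ b ih =>
    intro a c r h
    rw [List.range'_succ, List.foldl_cons]
    have hgt : c > (a : Int) := by push_cast at h ⊢; omega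
    rw [pvGatherStep, if_pos hgt]
    exact ih (a + 1) c r (by push_cast at h ⊢; omega)

-- A's gather loop, run from any group boundary i, appends the groups of s.drop i
lemma pv_gather_main (s : List (Int × Int)) (hs : s.Pairwise (fun a b => a.2 ≤ b.2)) :
    ∀ N i (c : Int) r, s.length - i ≤ N → c ≤ (i : Int) →
      ∃ c', (List.range' i (s.length - i) 1).foldl (pvGatherStep s) (c, r)
              = (c', r ++ pvGroups (s.drop i)) := by
  intro N
  induction N with
  | zero =>
    intro i c r hN _
    have hi : s.length ≤ i := by omega
    refine ⟨c, ?_⟩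
    rw [Nat.sub_eq_zero_of_le hi]
    simp [pvGroups, List.drop_eq_nil_of_le hi]
  | succ N ih =>
    intro i c r hN hc
    by_cases hi : i < s.length
    · -- process index i: one full group
      have hdrop : s.drop i = s[i] :: s.drop (i + 1) := List.drop_eq_getElem_cons hi
      set k := s[i].2 with hkdef
      set pred : Int × Int → Bool := fun p => p.2 == k with hpreddef
      set t := (s.drop i).takeWhile pred with htdef
      set u := (s.drop i).dropWhile pred with hudef
      have htu : t ++ u = s.drop i := List.takeWhile_append_dropWhile
      have htlen : 1 ≤ t.length := by
        rw [htdef, hdrop, List.takeWhile_cons]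
        have : pred s[i] = true := by simp [hpreddef, hkdef]
        rw [this]
        simp
      have htle : t.length ≤ s.length - i := by
        have := congrArg List.length htu
        simp at this
        omega
      set j := i + t.length with hjdef
      have hij : i < j := by omega
      have hjle : j ≤ s.length := by omega
      have hstep : pvGatherStep s (c, r) i
          = ((j : Int), r ++ [((t.map (·.1)).sum, k)]) := by
        rw [pvGatherStep, if_neg (by omega)]
        simp only
        rw [List.getD_eq_getElem s (0,0) hi, ← hkdef,
            pv_whileSum_spec s k s.length i 0 (by omega)]
        rw [← hpreddef, ← htdef]
        simp
        omega
      have hsplit : List.range' (i + 1) (s.length - i - 1) 1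
          = List.range' (i + 1) (j - i - 1) 1 ++ List.range' j (s.length - j) 1 := by
        have h2 : i + 1 + 1 * (j - i - 1) = j := by omega
        have h1 : (j - i - 1) + (s.length - j) = s.length - i - 1 := by omega
        rw [← h1, ← List.range'_append, h2]
      have hnsub : s.length - i = (s.length - i - 1) + 1 := by omega
      rw [hnsub, List.range'_succ, List.foldl_cons, hstep, hsplit, List.foldl_append]
      rw [pv_skip_fold s (j - i - 1) (i + 1) j _ (by push_cast; omega)]
      have hdropj : s.drop j = u := by
        have h1 : s.drop j = (s.drop i).drop t.length := by
          rw [List.drop_drop]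
        rw [h1, ← htu, List.drop_left]
      obtain ⟨c', hrec⟩ := ih j j (r ++ [((t.map (·.1)).sum, k)]) (by omega) (by omega)
      refine ⟨c', ?_⟩
      rw [hrec, hdropj]
      have hgc := pv_groups_cons (s.drop i) (hs.drop) s[i] (s.drop (i + 1)) hdrop
      rw [← hkdef, ← hpreddef, ← htdef, ← hudef] at hgc
      rw [hgc, List.append_assoc]
      rfl
    · refine ⟨c, ?_⟩
      have hi' : s.length ≤ i := by omega
      rw [Nat.sub_eq_zero_of_le hi']
      simp [pvGroups, List.drop_eq_nil_of_le hi']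

-- PySem.Set.ofList is a subsequence of its input
lemma pv_ofList_sublist (m : List Int) :
    ∀ s : List Int, ∃ w, m.foldl PySem.Set.add s = s ++ w ∧ w.Sublist m := by
  induction m with
  | nil => intro s; exact ⟨[], by simp⟩
  | cons x t ih =>
    intro s
    by_cases hx : x ∈ s
    · obtain ⟨w, hw, hsub⟩ := ih s
      exact ⟨w, by simpa [PySem.Set.add, PySem.Set.contains, hx] using hw, hsub.cons _⟩
    · obtain ⟨w, hw, hsub⟩ := ih (s ++ [x])
      exact ⟨x :: w, by simpa [PySem.Set.add, PySem.Set.contains, hx] using hw, hsub.cons₂ _⟩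

theorem pv_main (v1 v2 : List (Int × Int)) : mult_magma v1 v2 = mult_magma_alt v1 v2 := by
  have hA1 : (v1.foldl (fun acc e1 =>
        v2.foldl (fun acc e2 => acc ++ [(e1.1 * e2.1, |e1.2 - e2.2|)]) acc) [])
      = pvPairs v1 v2 := by
    rw [pv_nested_foldl v1 v2 (fun e1 e2 => (e1.1 * e2.1, |e1.2 - e2.2|))
        (fun a x => a ++ [x]) []]
    rw [pv_foldl_append_singleton]
    rfl
  set P := pvPairs v1 v2 with hPdef
  set s := PySem.List.sorted P (fun x => x.2) false with hsdef
  have hs : s.Pairwise (fun a b => a.2 ≤ b.2) := PySem.List.sorted_pairwise P (fun x => x.2)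
  have hperm : s.Perm P := PySem.List.sorted_perm P (fun x => x.2) false
  -- A computes the grouped view of s
  have hA : mult_magma v1 v2 = pvGroups s := by
    obtain ⟨c', hfold⟩ := pv_gather_main s hs s.length 0 (-1) [] (by omega) (by simp)
    simp only [Nat.sub_zero, List.drop_zero, List.nil_append] at hfold
    rw [mult_magma]
    simp only [hA1, ← hsdef, List.range_eq_range', hfold]
  -- B's dict holds exactly the per-key sums, keyed by the distinct keys of P
  have hB1 : (v1.foldl (fun d e1 =>
        v2.foldl (fun d e2 => d.modify |e1.2 - e2.2| 0 (· + e1.1 * e2.1)) d) PySem.Dict.empty)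
      = P.foldl (fun d p => d.modify p.2 0 (· + p.1)) PySem.Dict.empty :=
    pv_nested_foldl v1 v2 (fun e1 e2 => (e1.1 * e2.1, |e1.2 - e2.2|))
      (fun d p => d.modify p.2 0 (· + p.1)) PySem.Dict.empty
  have hkeys : (P.foldl (fun d p => d.modify p.2 0 (· + p.1)) PySem.Dict.empty).keys
      = PySem.Set.ofList (P.map (·.2)) := by
    have h := PySem.Dict.keys_foldl_modify_key P (fun p => p.2) 0
      (fun _ p => (· + p.1)) PySem.Dict.empty
    rw [h, PySem.Set.ofList_eq_foldl]
    rfl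
  have hgetD : ∀ k, (P.foldl (fun d p => d.modify p.2 0 (· + p.1)) PySem.Dict.empty).getD k 0
      = pvS k P := by
    intro k
    rw [pv_getD_fold]
    simp [PySem.Dict.getD, PySem.Dict.get?, PySem.Dict.empty]
  have hB : mult_magma_alt v1 v2
      = (PySem.List.sorted (PySem.Set.ofList (P.map (·.2))) (fun k => k) false).map
          (fun k => (pvS k P, k)) := by
    rw [mult_magma_alt]
    simp only [hB1, hkeys, hgetD]
  -- sorting the distinct keys of P gives the distinct keys of s in order
  have hys : PySem.List.sorted (PySem.Set.ofList (P.map (·.2))) (fun k => k) false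
      = PySem.Set.ofList (s.map (·.2)) := by
    apply PySem.List.sorted_eq_of_perm_of_pairwise_lt
    · rw [List.perm_ext_iff_of_nodup (PySem.Set.nodup_ofList _) (PySem.Set.nodup_ofList _)]
      intro a
      rw [PySem.Set.mem_ofList, PySem.Set.mem_ofList]
      exact (hperm.map (·.2)).mem_iff
    · obtain ⟨w, hw, hsub⟩ := pv_ofList_sublist (s.map (·.2)) []
      have hof : PySem.Set.ofList (s.map (·.2)) = w := by
        rw [PySem.Set.ofList_eq_foldl, hw]
        simp
      rw [hof]
      have hle : w.Pairwise (fun a b => a ≤ b) :=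
        (PySem.List.sorted_map_key_pairwise P (fun x => x.2)).sublist hsub
      have hne : w.Pairwise (fun a b => a ≠ b) := hof ▸ PySem.Set.nodup_ofList _
      exact (hle.and hne).imp (fun h => lt_of_le_of_ne h.1 h.2)
  have hSp : ∀ k, pvS k s = pvS k P := fun k =>
    List.Perm.sum_eq ((hperm.filter _).map _)
  rw [hA, hB, hys, pvGroups]
  exact List.map_congr_left (fun k _ => by rw [hSp k])

-- ===== VERDICT (by name: the statement is the Claim_ definition above) =====
theorem mult_magma_spec : Claim_equal_mult_magma := by
  intro v1 v2 _
  unfold Spec_mult_magma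
  exact pv_main v1 v2
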